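-- pv_equiv track=rewrite | github.com/mgmtsweni/Learner_Assist | Learner_assist.py | calculate_aps
-- ===== SOURCE A (Python) =====
-- def calculate_aps(results):
--     total = 0
--     for score in results.values():
--         if score >= 80:
--             total += 7
--         elif score >= 70:
--             total += 6
--         elif score >= 60:
--             total += 5
--         elif score >= 50:
--             total += 4
--         elif score >= 40:
--             total += 3
--         elif score >= 30:
--             total += 2
--         elif score >= 0:
--             total += 1
--     return total
-- ===== SOURCE B (Python) =====
-- THRESHOLDS = [0, 30, 40, 50, 60, 70, 80]
--
-- def calculate_aps(results):
--     # APS points = number of thresholds the score meets; sum over all scores.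
--     return sum(sum(1 for t in THRESHOLDS if score >= t) for score in results.values())
-- ===== Notes on version B (the rewrite author's own statement) =====
-- stated objective: simpler
-- what changed: Replaces the seven-branch if/elif ladder with a threshold table: each score contributes the count of thresholds it meets, summed in one expression.
import Mathlib
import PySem

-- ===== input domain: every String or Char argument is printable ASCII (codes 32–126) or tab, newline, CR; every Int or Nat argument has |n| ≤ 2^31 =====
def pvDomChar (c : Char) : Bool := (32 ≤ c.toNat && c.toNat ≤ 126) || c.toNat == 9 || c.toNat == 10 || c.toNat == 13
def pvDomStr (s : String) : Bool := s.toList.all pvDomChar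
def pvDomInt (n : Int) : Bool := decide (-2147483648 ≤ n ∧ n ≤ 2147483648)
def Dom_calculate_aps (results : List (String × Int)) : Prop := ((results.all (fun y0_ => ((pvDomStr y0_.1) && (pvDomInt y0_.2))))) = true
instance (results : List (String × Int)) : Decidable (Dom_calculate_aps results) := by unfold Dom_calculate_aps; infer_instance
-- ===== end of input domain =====

-- ===== PORT A =====
-- B replaces A's if/elif ladder with a threshold-count table; same return value everywhere.
def calculate_aps (results : List (String × Int)) : Int :=
  results.foldl (fun total kv =>
    let score := kv.2
    if score ≥ 80 then total + 7
    else if score ≥ 70 then total + 6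
    else if score ≥ 60 then total + 5
    else if score ≥ 50 then total + 4
    else if score ≥ 40 then total + 3
    else if score ≥ 30 then total + 2
    else if score ≥ 0 then total + 1
    else total) 0

-- ===== PORT B =====
def pvThresholds : List Int := [0, 30, 40, 50, 60, 70, 80]

def calculate_aps_alt (results : List (String × Int)) : Int :=
  (results.map (fun kv => ((pvThresholds.countP (fun t => kv.2 ≥ t) : Nat) : Int))).sum

-- ===== PRECONDITION & SPEC =====
def Spec_calculate_aps (results : List (String × Int)) (out : Int) : Prop := out = calculate_aps_alt results
instance (results : List (String × Int)) (out : Int) : Decidable (Spec_calculate_aps results out) := by unfold Spec_calculate_aps; infer_instance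

-- ===== CLAIM (what is proved, stated in full; the proofs are below) =====
def Claim_equal_calculate_aps : Prop := ∀ (results : List (String × Int)), Dom_calculate_aps results → Spec_calculate_aps results (calculate_aps results)

-- ===== LEMMAS AND PROOFS =====

-- ===== VERDICT (by name: the statement is the Claim_ definition above) =====
theorem pv_step (s : Int) :
    ((pvThresholds.countP (fun t => s ≥ t) : Nat) : Int) =
      (if s ≥ 80 then (7:Int) else if s ≥ 70 then 6 else if s ≥ 60 then 5 else if s ≥ 50 then 4
       else if s ≥ 40 then 3 else if s ≥ 30 then 2 else if s ≥ 0 then 1 else 0) := by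
  simp only [pvThresholds, List.countP_cons, List.countP_nil, ge_iff_le, decide_eq_true_eq]
  push_cast
  split_ifs <;> omega

theorem pv_fold (results : List (String × Int)) (t : Int) :
    results.foldl (fun total kv =>
      let score := kv.2
      if score ≥ 80 then total + 7
      else if score ≥ 70 then total + 6
      else if score ≥ 60 then total + 5
      else if score ≥ 50 then total + 4
      else if score ≥ 40 then total + 3
      else if score ≥ 30 then total + 2
      else if score ≥ 0 then total + 1
      else total) t
    = t + (results.map (fun kv => ((pvThresholds.countP (fun t => kv.2 ≥ t) : Nat) : Int))).sum := by
  induction results generalizing t with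
  | nil => simp
  | cons kv rest ih =>
    simp only [List.foldl_cons, List.map_cons, List.sum_cons, ih, pv_step]
    split_ifs <;> ring

theorem calculate_aps_spec : Claim_equal_calculate_aps := by
  intro results _
  unfold Spec_calculate_aps calculate_aps
  rw [pv_fold]
  simp [calculate_aps_alt]
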